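-- pv_equiv track=rewrite | github.com/manidhar2006/MLNS-Project | paper/mutgat_code/scripts/annotate_vcfs.py | _parse_ann
-- ===== SOURCE A (Python) =====
-- EFFECT_CLASSES = [
--     "stop_gained",
--     "frameshift_variant",
--     "start_lost",
--     "stop_lost",
--     "splice_region_variant",
--     "missense_variant",
--     "synonymous_variant",
--     "other",
-- ]
--
-- def _parse_ann(ann_field: str) -> str:
--     """
--     Extract the most severe effect class from a snpEff ANN= field.
--     Falls back to inferring from EFF= (older snpEff format).
--     """
--     severity = {e: i for i, e in enumerate(EFFECT_CLASSES)}
--     best = "other"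
--     best_rank = severity["other"]
--     for entry in ann_field.split(","):
--         parts = entry.split("|")
--         effect_str = parts[1].strip().lower() if len(parts) > 1 else ""
--         for cls in EFFECT_CLASSES:
--             if cls in effect_str:
--                 if severity[cls] < best_rank:
--                     best_rank = severity[cls]
--                     best = cls
--                 break
--     return best
-- ===== SOURCE B (Python) =====
-- EFFECT_CLASSES = [
--     "stop_gained",
--     "frameshift_variant",
--     "start_lost",
--     "stop_lost",
--     "splice_region_variant",
--     "missense_variant",
--     "synonymous_variant",
--     "other",
-- ]
--
-- def _parse_ann(ann_field: str) -> str: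
--     """Most severe effect class: priority-first search over the entry effect strings."""
--     effects = []
--     for entry in ann_field.split(","):
--         parts = entry.split("|")
--         effects.append(parts[1].strip().lower() if len(parts) > 1 else "")
--     for cls in EFFECT_CLASSES:
--         if any(cls in e for e in effects):
--             return cls
--     return "other"
-- ===== Notes on version B (the rewrite author's own statement) =====
-- stated objective: simpler
-- what changed: A tracks a running (best, best_rank) minimum across entries with an inner break loop and a severity dict; B precomputes the per-entry effect strings once and then scans EFFECT_CLASSES in priority order, returning the first class contained in any effect string, so no rank state or severity map is needed.
import Mathlib
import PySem

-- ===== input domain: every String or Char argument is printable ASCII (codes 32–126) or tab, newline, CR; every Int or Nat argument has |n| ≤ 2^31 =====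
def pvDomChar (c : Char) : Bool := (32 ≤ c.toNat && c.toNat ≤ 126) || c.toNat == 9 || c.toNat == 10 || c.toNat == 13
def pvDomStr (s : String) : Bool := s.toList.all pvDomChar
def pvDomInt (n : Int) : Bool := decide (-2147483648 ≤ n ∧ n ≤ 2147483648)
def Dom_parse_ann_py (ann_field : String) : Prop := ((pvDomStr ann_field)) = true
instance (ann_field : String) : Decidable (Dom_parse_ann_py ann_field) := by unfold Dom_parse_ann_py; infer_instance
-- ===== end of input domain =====

-- B replaces A's running-minimum state over entries with a stateless priority-first search
-- over the precomputed effect strings (objective: simpler; same asymptotic cost).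

-- ===== PORT A =====
def effectClasses : List String :=
  ["stop_gained", "frameshift_variant", "start_lost", "stop_lost",
   "splice_region_variant", "missense_variant", "synonymous_variant", "other"]

-- severity = {e: i for i, e in enumerate(EFFECT_CLASSES)}
def sevA : PySem.Dict String Int :=
  PySem.Dict.ofList ((PySem.List.enumerate effectClasses).map (fun p => (p.2, p.1)))

-- the inner 'for cls in EFFECT_CLASSES: … break' loop; severity[cls] is always present,
-- so the getD default is never used
def innerA (effect_str : String) : String × Int → List String → String × Int
  | st, [] => st
  | (best, best_rank), cls :: rest =>
    if PySem.Str.isIn cls effect_str then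
      (if sevA.getD cls 0 < best_rank then (cls, sevA.getD cls 0) else (best, best_rank))
    else innerA effect_str (best, best_rank) rest

def parse_ann_py (ann_field : String) : String :=
  let st := ((PySem.Str.split? ann_field ",").getD []).foldl
    (fun st entry =>
      let parts := (PySem.Str.split? entry "|").getD []
      let effect_str :=
        if 1 < parts.length then PySem.Str.lower (PySem.Str.strip (PySem.List.pyGetD parts 1 "")) else ""
      innerA effect_str st effectClasses)
    ("other", sevA.getD "other" 0)
  st.1

-- ===== PORT B =====
def firstMatch (effects : List String) : List String → String
  | [] => "other"
  | cls :: rest =>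
    if effects.any (fun e => PySem.Str.isIn cls e) then cls else firstMatch effects rest

def parse_ann_py_alt (ann_field : String) : String :=
  let effects := ((PySem.Str.split? ann_field ",").getD []).map (fun entry =>
    let parts := (PySem.Str.split? entry "|").getD []
    if 1 < parts.length then PySem.Str.lower (PySem.Str.strip (PySem.List.pyGetD parts 1 "")) else "")
  firstMatch effects effectClasses

-- ===== PRECONDITION & SPEC =====
def Spec_parse_ann_py (ann_field : String) (out : String) : Prop := out = parse_ann_py_alt ann_field
instance (ann_field : String) (out : String) : Decidable (Spec_parse_ann_py ann_field out) := by unfold Spec_parse_ann_py; infer_instance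

-- ===== CLAIM (what is proved, stated in full; the proofs are below) =====
def Claim_equal_parse_ann_py : Prop := ∀ (ann_field : String), Dom_parse_ann_py ann_field → Spec_parse_ann_py ann_field (parse_ann_py ann_field)

-- ===== LEMMAS AND PROOFS =====

-- effect-string extraction shared by both ports (definitionally equal to their inline lets)
def effOf (entry : String) : String :=
  let parts := (PySem.Str.split? entry "|").getD []
  if 1 < parts.length then PySem.Str.lower (PySem.Str.strip (PySem.List.pyGetD parts 1 "")) else ""

-- the class at priority index m ("other" at 7)
def cl (m : Nat) : String := effectClasses.getD m "other"
def rk (e : String) : Nat :=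
  if PySem.Str.isIn "stop_gained" e then 0
  else if PySem.Str.isIn "frameshift_variant" e then 1
  else if PySem.Str.isIn "start_lost" e then 2
  else if PySem.Str.isIn "stop_lost" e then 3
  else if PySem.Str.isIn "splice_region_variant" e then 4
  else if PySem.Str.isIn "missense_variant" e then 5
  else if PySem.Str.isIn "synonymous_variant" e then 6
  else 7
lemma lemA (m k : Nat) (h : ((k : Nat) : Int) < ((m : Nat) : Int)) :
    ((cl k, ((k : Nat) : Int)) : String × Int) = (cl (min m k), ((min m k : Nat) : Int)) := by
  have hh : min m k = k := by omega
  rw [hh]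
lemma lemB (m k : Nat) (h : ¬(((k : Nat) : Int) < ((m : Nat) : Int))) :
    ((cl m, ((m : Nat) : Int)) : String × Int) = (cl (min m k), ((min m k : Nat) : Int)) := by
  have hh : min m k = m := by omega
  rw [hh]
lemma stepA (e : String) (m : Nat) (hm : m ≤ 7) :
    innerA e (cl m, ((m : Nat) : Int)) effectClasses
      = (cl (min m (rk e)), ((min m (rk e) : Nat) : Int)) := by
  have s0 : sevA.getD "stop_gained" 0 = 0 := by decide
  have s1 : sevA.getD "frameshift_variant" 0 = 1 := by decide
  have s2 : sevA.getD "start_lost" 0 = 2 := by decide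
  have s3 : sevA.getD "stop_lost" 0 = 3 := by decide
  have s4 : sevA.getD "splice_region_variant" 0 = 4 := by decide
  have s5 : sevA.getD "missense_variant" 0 = 5 := by decide
  have s6 : sevA.getD "synonymous_variant" 0 = 6 := by decide
  have s7 : sevA.getD "other" 0 = 7 := by decide
  simp only [innerA, effectClasses, s0, s1, s2, s3, s4, s5, s6, s7, rk]
  split_ifs <;>
    first
      | exact lemA m 0 (by omega) | exact lemA m 1 (by omega) | exact lemA m 2 (by omega)
      | exact lemA m 3 (by omega) | exact lemA m 4 (by omega) | exact lemA m 5 (by omega)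
      | exact lemA m 6 (by omega) | exact lemA m 7 (by omega)
      | exact lemB m 0 (by omega) | exact lemB m 1 (by omega) | exact lemB m 2 (by omega)
      | exact lemB m 3 (by omega) | exact lemB m 4 (by omega) | exact lemB m 5 (by omega)
      | exact lemB m 6 (by omega) | exact lemB m 7 (by omega)
def minRk (effects : List String) (m : Nat) : Nat :=
  effects.foldl (fun m e => min m (rk e)) m
lemma minRk_le_init (effects : List String) (m : Nat) : minRk effects m ≤ m := by
  induction effects generalizing m with
  | nil => exact le_refl m
  | cons e rest ih => exact le_trans (ih (min m (rk e))) (min_le_left _ _)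
lemma minRk_le_mem (effects : List String) (m : Nat) (e : String) (he : e ∈ effects) :
    minRk effects m ≤ rk e := by
  induction effects generalizing m with
  | nil => cases he
  | cons x rest ih =>
    rcases List.mem_cons.mp he with h | h
    · subst h
      exact le_trans (minRk_le_init rest (min m (rk e))) (min_le_right _ _)
    · exact ih (min m (rk x)) h
lemma minRk_cases (effects : List String) (m : Nat) :
    minRk effects m = m ∨ ∃ e ∈ effects, rk e = minRk effects m := by
  induction effects generalizing m with
  | nil => exact Or.inl rfl
  | cons x rest ih =>
    rcases ih (min m (rk x)) with h | ⟨e, he, hrk⟩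
    · rcases Nat.lt_or_ge (rk x) m with hlt | hle
      · right; exact ⟨x, List.mem_cons_self .., by rw [minRk, List.foldl_cons, ← minRk, h]; omega⟩
      · left; rw [minRk, List.foldl_cons, ← minRk]; rw [h]; omega
    · right; exact ⟨e, List.mem_cons_of_mem _ he, hrk⟩
lemma rk_le_of_isIn0 (e : String) (h : PySem.Str.isIn "stop_gained" e = true) : rk e ≤ 0 := by
  unfold rk; split_ifs <;> first | omega | simp_all
lemma rk_le_of_isIn1 (e : String) (h : PySem.Str.isIn "frameshift_variant" e = true) : rk e ≤ 1 := by
  unfold rk; split_ifs <;> first | omega | simp_all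
lemma rk_le_of_isIn2 (e : String) (h : PySem.Str.isIn "start_lost" e = true) : rk e ≤ 2 := by
  unfold rk; split_ifs <;> first | omega | simp_all
lemma rk_le_of_isIn3 (e : String) (h : PySem.Str.isIn "stop_lost" e = true) : rk e ≤ 3 := by
  unfold rk; split_ifs <;> first | omega | simp_all
lemma rk_le_of_isIn4 (e : String) (h : PySem.Str.isIn "splice_region_variant" e = true) : rk e ≤ 4 := by
  unfold rk; split_ifs <;> first | omega | simp_all
lemma rk_le_of_isIn5 (e : String) (h : PySem.Str.isIn "missense_variant" e = true) : rk e ≤ 5 := by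
  unfold rk; split_ifs <;> first | omega | simp_all
lemma rk_le_of_isIn6 (e : String) (h : PySem.Str.isIn "synonymous_variant" e = true) : rk e ≤ 6 := by
  unfold rk; split_ifs <;> first | omega | simp_all
lemma isIn_of_rk0 (e : String) (h : rk e = 0) : PySem.Str.isIn "stop_gained" e = true := by
  unfold rk at h; split_ifs at h <;> first | exact absurd h (by decide) | assumption
lemma isIn_of_rk1 (e : String) (h : rk e = 1) : PySem.Str.isIn "frameshift_variant" e = true := by
  unfold rk at h; split_ifs at h <;> first | exact absurd h (by decide) | assumption
lemma isIn_of_rk2 (e : String) (h : rk e = 2) : PySem.Str.isIn "start_lost" e = true := by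
  unfold rk at h; split_ifs at h <;> first | exact absurd h (by decide) | assumption
lemma isIn_of_rk3 (e : String) (h : rk e = 3) : PySem.Str.isIn "stop_lost" e = true := by
  unfold rk at h; split_ifs at h <;> first | exact absurd h (by decide) | assumption
lemma isIn_of_rk4 (e : String) (h : rk e = 4) : PySem.Str.isIn "splice_region_variant" e = true := by
  unfold rk at h; split_ifs at h <;> first | exact absurd h (by decide) | assumption
lemma isIn_of_rk5 (e : String) (h : rk e = 5) : PySem.Str.isIn "missense_variant" e = true := by
  unfold rk at h; split_ifs at h <;> first | exact absurd h (by decide) | assumption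
lemma isIn_of_rk6 (e : String) (h : rk e = 6) : PySem.Str.isIn "synonymous_variant" e = true := by
  unfold rk at h; split_ifs at h <;> first | exact absurd h (by decide) | assumption

lemma anyFalse (effects : List String) (v j : Nat) (cls : String)
    (hcls : ∀ e : String, PySem.Str.isIn cls e = true → rk e ≤ j)
    (hmem : ∀ e ∈ effects, v ≤ rk e) (hj : j < v) :
    effects.any (fun e => PySem.Str.isIn cls e) = false := by
  rw [List.any_eq_false]
  intro e he hin
  have h1 := hcls e hin
  have h2 := hmem e he
  omega

lemma firstMatchEq (effects : List String) :
    firstMatch effects effectClasses = cl (minRk effects 7) := by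
  have hM7 := minRk_le_init effects 7
  have hmem : ∀ e ∈ effects, minRk effects 7 ≤ rk e := fun e he => minRk_le_mem effects 7 e he
  have hcases := minRk_cases effects 7
  set M := minRk effects 7 with hM
  clear_value M
  by_cases h7 : M = 7
  · subst h7
    have a0 := anyFalse effects 7 0 "stop_gained" rk_le_of_isIn0 hmem (by omega)
    have a1 := anyFalse effects 7 1 "frameshift_variant" rk_le_of_isIn1 hmem (by omega)
    have a2 := anyFalse effects 7 2 "start_lost" rk_le_of_isIn2 hmem (by omega)
    have a3 := anyFalse effects 7 3 "stop_lost" rk_le_of_isIn3 hmem (by omega)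
    have a4 := anyFalse effects 7 4 "splice_region_variant" rk_le_of_isIn4 hmem (by omega)
    have a5 := anyFalse effects 7 5 "missense_variant" rk_le_of_isIn5 hmem (by omega)
    have a6 := anyFalse effects 7 6 "synonymous_variant" rk_le_of_isIn6 hmem (by omega)
    simp only [firstMatch, effectClasses, a0, a1, a2, a3, a4, a5, a6, Bool.false_eq_true,
      if_false, ite_self]
    rfl
  · obtain ⟨e0, he0, hrk⟩ := hcases.resolve_left h7
    have hlt : M < 7 := by omega
    interval_cases M
    · have t0 : effects.any (fun e => PySem.Str.isIn "stop_gained" e) = true :=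
        List.any_eq_true.mpr ⟨e0, he0, isIn_of_rk0 e0 hrk⟩
      simp only [firstMatch, effectClasses, t0, if_true]
      rfl
    · have a0 := anyFalse effects 1 0 "stop_gained" rk_le_of_isIn0 hmem (by omega)
      have t1 : effects.any (fun e => PySem.Str.isIn "frameshift_variant" e) = true :=
        List.any_eq_true.mpr ⟨e0, he0, isIn_of_rk1 e0 hrk⟩
      simp only [firstMatch, effectClasses, a0, t1, Bool.false_eq_true, if_false, if_true]
      rfl
    · have a0 := anyFalse effects 2 0 "stop_gained" rk_le_of_isIn0 hmem (by omega)
      have a1 := anyFalse effects 2 1 "frameshift_variant" rk_le_of_isIn1 hmem (by omega)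
      have t2 : effects.any (fun e => PySem.Str.isIn "start_lost" e) = true :=
        List.any_eq_true.mpr ⟨e0, he0, isIn_of_rk2 e0 hrk⟩
      simp only [firstMatch, effectClasses, a0, a1, t2, Bool.false_eq_true, if_false, if_true]
      rfl
    · have a0 := anyFalse effects 3 0 "stop_gained" rk_le_of_isIn0 hmem (by omega)
      have a1 := anyFalse effects 3 1 "frameshift_variant" rk_le_of_isIn1 hmem (by omega)
      have a2 := anyFalse effects 3 2 "start_lost" rk_le_of_isIn2 hmem (by omega)
      have t3 : effects.any (fun e => PySem.Str.isIn "stop_lost" e) = true :=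
        List.any_eq_true.mpr ⟨e0, he0, isIn_of_rk3 e0 hrk⟩
      simp only [firstMatch, effectClasses, a0, a1, a2, t3, Bool.false_eq_true, if_false, if_true]
      rfl
    · have a0 := anyFalse effects 4 0 "stop_gained" rk_le_of_isIn0 hmem (by omega)
      have a1 := anyFalse effects 4 1 "frameshift_variant" rk_le_of_isIn1 hmem (by omega)
      have a2 := anyFalse effects 4 2 "start_lost" rk_le_of_isIn2 hmem (by omega)
      have a3 := anyFalse effects 4 3 "stop_lost" rk_le_of_isIn3 hmem (by omega)
      have t4 : effects.any (fun e => PySem.Str.isIn "splice_region_variant" e) = true :=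
        List.any_eq_true.mpr ⟨e0, he0, isIn_of_rk4 e0 hrk⟩
      simp only [firstMatch, effectClasses, a0, a1, a2, a3, t4, Bool.false_eq_true, if_false, if_true]
      rfl
    · have a0 := anyFalse effects 5 0 "stop_gained" rk_le_of_isIn0 hmem (by omega)
      have a1 := anyFalse effects 5 1 "frameshift_variant" rk_le_of_isIn1 hmem (by omega)
      have a2 := anyFalse effects 5 2 "start_lost" rk_le_of_isIn2 hmem (by omega)
      have a3 := anyFalse effects 5 3 "stop_lost" rk_le_of_isIn3 hmem (by omega)
      have a4 := anyFalse effects 5 4 "splice_region_variant" rk_le_of_isIn4 hmem (by omega)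
      have t5 : effects.any (fun e => PySem.Str.isIn "missense_variant" e) = true :=
        List.any_eq_true.mpr ⟨e0, he0, isIn_of_rk5 e0 hrk⟩
      simp only [firstMatch, effectClasses, a0, a1, a2, a3, a4, t5, Bool.false_eq_true, if_false, if_true]
      rfl
    · have a0 := anyFalse effects 6 0 "stop_gained" rk_le_of_isIn0 hmem (by omega)
      have a1 := anyFalse effects 6 1 "frameshift_variant" rk_le_of_isIn1 hmem (by omega)
      have a2 := anyFalse effects 6 2 "start_lost" rk_le_of_isIn2 hmem (by omega)
      have a3 := anyFalse effects 6 3 "stop_lost" rk_le_of_isIn3 hmem (by omega)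
      have a4 := anyFalse effects 6 4 "splice_region_variant" rk_le_of_isIn4 hmem (by omega)
      have a5 := anyFalse effects 6 5 "missense_variant" rk_le_of_isIn5 hmem (by omega)
      have t6 : effects.any (fun e => PySem.Str.isIn "synonymous_variant" e) = true :=
        List.any_eq_true.mpr ⟨e0, he0, isIn_of_rk6 e0 hrk⟩
      simp only [firstMatch, effectClasses, a0, a1, a2, a3, a4, a5, t6, Bool.false_eq_true, if_false, if_true]
      rfl

lemma foldA (effects : List String) (m : Nat) (hm : m ≤ 7) :
    effects.foldl (fun st e => innerA e st effectClasses) (cl m, ((m : Nat) : Int))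
      = (cl (minRk effects m), ((minRk effects m : Nat) : Int)) := by
  induction effects generalizing m with
  | nil => rfl
  | cons e rest ih =>
    rw [List.foldl_cons, stepA e m hm]
    exact ih (min m (rk e)) (le_trans (min_le_left _ _) hm)

theorem parse_ann_py_eq (ann_field : String) : parse_ann_py ann_field = parse_ann_py_alt ann_field := by
  have h1 : parse_ann_py ann_field
      = (((PySem.Str.split? ann_field ",").getD []).foldl
          (fun st entry => innerA (effOf entry) st effectClasses) (cl 7, ((7 : Nat) : Int))).1 := by
    rfl
  have h2 : parse_ann_py_alt ann_field
      = firstMatch (((PySem.Str.split? ann_field ",").getD []).map effOf) effectClasses := by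
    rfl
  have h3 := foldA ((((PySem.Str.split? ann_field ",").getD []).map effOf)) 7 (le_refl 7)
  simp only [List.foldl_map] at h3
  rw [h1, h2, firstMatchEq, h3]

-- ===== VERDICT (by name: the statement is the Claim_ definition above) =====
theorem parse_ann_py_spec : Claim_equal_parse_ann_py := by
  intro af _
  exact parse_ann_py_eq af
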